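-- pv_equiv track=rewrite | github.com/causemx/sonetwork | gui.py | _calculate_pyramid_layers
-- ===== SOURCE A (Python) =====
-- def _calculate_pyramid_layers(num_nodes):
--     """Calculate how many nodes should be in each layer of the pyramid"""
--     layers = []
--     nodes_left = num_nodes - 1  # Excluding master node
--     current_layer = 1
--
--     while nodes_left > 0:
--         nodes_in_layer = min(current_layer * 2 - 1, nodes_left)
--         layers.append(nodes_in_layer)
--         nodes_left -= nodes_in_layer
--         current_layer += 1
--
--     return layers
-- ===== SOURCE B (Python) =====
-- def _isqrt(n):
--     # Newton's method integer square root, n >= 1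
--     x = n
--     y = (x + 1) // 2
--     while y < x:
--         x = y
--         y = (x + n // x) // 2
--     return x
--
--
-- def _calculate_pyramid_layers(num_nodes):
--     """Calculate how many nodes should be in each layer of the pyramid"""
--     nodes_left = num_nodes - 1  # Excluding master node
--     if nodes_left <= 0:
--         return []
--     m = _isqrt(nodes_left)  # number of complete layers: 1+3+...+(2m-1) = m*m
--     layers = [2 * k - 1 for k in range(1, m + 1)]
--     remainder = nodes_left - m * m
--     if remainder > 0:
--         layers.append(remainder)
--     return layers
-- ===== Notes on version B (the rewrite author's own statement) =====
-- stated objective: alternative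
-- what changed: Replaces the layer-by-layer subtraction loop by the closed form (the sum of the first m odd numbers is m squared): compute m with a Newton-iteration integer square root, emit the m complete layers by a comprehension and append the positive remainder if any.
import Mathlib
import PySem

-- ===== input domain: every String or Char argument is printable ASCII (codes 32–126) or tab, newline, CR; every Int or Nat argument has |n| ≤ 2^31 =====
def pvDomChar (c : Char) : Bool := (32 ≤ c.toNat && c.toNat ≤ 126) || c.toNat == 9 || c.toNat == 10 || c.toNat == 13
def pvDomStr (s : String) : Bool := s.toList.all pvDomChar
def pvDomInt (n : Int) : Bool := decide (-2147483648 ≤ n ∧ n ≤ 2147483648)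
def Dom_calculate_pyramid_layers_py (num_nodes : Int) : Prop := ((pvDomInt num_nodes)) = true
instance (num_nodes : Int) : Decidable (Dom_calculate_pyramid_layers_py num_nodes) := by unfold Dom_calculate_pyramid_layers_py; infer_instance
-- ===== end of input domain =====

-- B replaces A's layer-by-layer simulation by the closed form (the sum of the first m odd numbers is m squared),
-- computing m with a Newton integer square root (objective: alternative algorithm; same return value).

-- ===== PORT A =====
-- while nodes_left > 0: append min(2*layer-1, nodes_left); fuel (nodes_left.toNat) only makes the
-- recursion total — it is never exhausted on the actual calls, each iteration removes ≥ 1 node.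
def pyLoopA : Nat → Int → Int → List Int → List Int
  | 0, _, _, layers => layers
  | fuel+1, nodes_left, current_layer, layers =>
    if 0 < nodes_left then
      let v := min (current_layer * 2 - 1) nodes_left
      pyLoopA fuel (nodes_left - v) (current_layer + 1) (layers ++ [v])
    else layers

def calculate_pyramid_layers_py (num_nodes : Int) : List Int :=
  pyLoopA (num_nodes - 1).toNat (num_nodes - 1) 1 []

-- ===== PORT B =====
-- Newton's-method integer sqrt from Source B; fuel (n.toNat) is a totality guard only: x decreases
-- by ≥ 1 each iteration and stays ≥ 1, so the guard never fires on the actual calls (n ≥ 1).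
def pyIsqrtLoop : Nat → Int → Int → Int → Int
  | 0, _, x, _ => x
  | fuel+1, n, x, y =>
    if y < x then
      pyIsqrtLoop fuel n y (PySem.Int.floordiv (y + PySem.Int.floordiv n y) 2)
    else x

def pyIsqrt (n : Int) : Int :=
  pyIsqrtLoop n.toNat n n (PySem.Int.floordiv (n + 1) 2)

def calculate_pyramid_layers_py_alt (num_nodes : Int) : List Int :=
  let nodes_left := num_nodes - 1
  if nodes_left ≤ 0 then []
  else
    let m := pyIsqrt nodes_left
    let layers := (PySem.List.pyRange 1 (m + 1) 1).map (fun k => 2 * k - 1)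
    let remainder := nodes_left - m * m
    if 0 < remainder then layers ++ [remainder] else layers

-- ===== PRECONDITION & SPEC =====
def Spec_calculate_pyramid_layers_py (num_nodes : Int) (out : List Int) : Prop := out = calculate_pyramid_layers_py_alt num_nodes
instance (num_nodes : Int) (out : List Int) : Decidable (Spec_calculate_pyramid_layers_py num_nodes out) := by unfold Spec_calculate_pyramid_layers_py; infer_instance

-- ===== CLAIM (what is proved, stated in full; the proofs are below) =====
def Claim_equal_calculate_pyramid_layers_py : Prop := ∀ (num_nodes : Int), Dom_calculate_pyramid_layers_py num_nodes → Spec_calculate_pyramid_layers_py num_nodes (calculate_pyramid_layers_py num_nodes)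

-- ===== LEMMAS AND PROOFS =====

-- Newton loop: if 1 ≤ n, 1 ≤ x, n < (x+1)², then the loop returns the integer square root of n.
lemma pyIsqrtLoop_spec (fuel : Nat) : ∀ (n x : Int), 1 ≤ n → 1 ≤ x → n < (x + 1) * (x + 1) →
    x.toNat ≤ fuel + 1 →
    let s := pyIsqrtLoop fuel n x (PySem.Int.floordiv (x + PySem.Int.floordiv n x) 2)
    1 ≤ s ∧ s * s ≤ n ∧ n < (s + 1) * (s + 1) := by
  induction fuel with
  | zero =>
    intro n x hn hx hub hf
    have hx1 : x = 1 := by omega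
    subst hx1
    simp only [pyIsqrtLoop]
    exact ⟨le_refl 1, by nlinarith, by nlinarith⟩
  | succ fuel ih =>
    intro n x hn hx hub hf
    set q := PySem.Int.floordiv n x with hq
    set y := PySem.Int.floordiv (x + q) 2 with hy
    have hx0 : (0:Int) < x := by omega
    have hqx : q * x ≤ n ∧ n < (q + 1) * x := by
      constructor
      · exact (PySem.Int.le_floordiv_iff_mul_le hx0).mp (le_refl q)
      · exact (PySem.Int.floordiv_lt_iff_lt_mul hx0).mp (by omega)
    have hy2 : 2 * y ≤ x + q ∧ x + q < 2 * (y + 1) := by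
      constructor
      · have := (PySem.Int.le_floordiv_iff_mul_le (show (0:Int) < 2 by norm_num)).mp (le_refl y)
        omega
      · have := (PySem.Int.floordiv_lt_iff_lt_mul (show (0:Int) < 2 by norm_num)).mp
          (show PySem.Int.floordiv (x + q) 2 < y + 1 by omega)
        omega
    -- n < (y+1)² : from (x+q+1)² ≥ 4x(q+1) > 4n
    have hyub : n < (y + 1) * (y + 1) := by
      nlinarith [sq_nonneg (x - q - 1), hqx.1, hqx.2, hy2.1, hy2.2, sq_nonneg (2*(y+1) - (x+q+1))]
    have hy1 : 1 ≤ y := by nlinarith [hyub]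
    show 1 ≤ pyIsqrtLoop (fuel+1) n x y ∧ _ ∧ _
    rw [pyIsqrtLoop]
    by_cases hlt : y < x
    · simp only [hlt, if_true]
      exact ih n y hn hy1 hyub (by omega)
    · simp only [hlt, if_false]
      refine ⟨hx, ?_, hub⟩
      have : x ≤ y := by omega
      nlinarith [hqx.1, hy2.1]

-- for n ≥ 1, floordiv n n = 1, so pyIsqrt's initial y = (n+1)//2 matches the loop invariant form
lemma pyIsqrt_spec (n : Int) (hn : 1 ≤ n) :
    1 ≤ pyIsqrt n ∧ pyIsqrt n * pyIsqrt n ≤ n ∧ n < (pyIsqrt n + 1) * (pyIsqrt n + 1) := by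
  have hself : PySem.Int.floordiv n n = 1 := by
    rw [PySem.Int.floordiv_eq_ediv_of_pos (by omega)]
    exact Int.ediv_self (by omega)
  have h := pyIsqrtLoop_spec n.toNat n n hn hn (by nlinarith) (by omega)
  rw [hself] at h
  exact h

-- the A-loop starting at layer c with nl nodes left, given q = isqrt (nl + (c-1)²)
lemma pyLoopA_eq (fuel : Nat) : ∀ (nl c q : Int) (acc : List Int),
    1 ≤ c → 0 ≤ nl → nl.toNat ≤ fuel →
    c - 1 ≤ q → q * q ≤ nl + (c-1)*(c-1) → nl + (c-1)*(c-1) < (q+1)*(q+1) →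
    pyLoopA fuel nl c acc =
      acc ++ (PySem.List.pyRange c (q + 1) 1).map (fun k => 2 * k - 1)
          ++ (if 0 < nl + (c-1)*(c-1) - q * q then [nl + (c-1)*(c-1) - q * q] else []) := by
  induction fuel with
  | zero =>
    intro nl c q acc hc hnl hf hcq hlb hub
    have h0 : nl = 0 := by omega
    subst h0
    have hq : q = c - 1 := by nlinarith
    subst hq
    rw [PySem.List.pyRange_one_eq_nil (show (c:Int) - 1 + 1 ≤ c by omega)]
    have h2 : (0:Int) + (c-1)*(c-1) - (c-1)*(c-1) = 0 := by ring
    rw [h2]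
    simp [pyLoopA]
  | succ fuel ih =>
    intro nl c q acc hc hnl hf hcq hlb hub
    rw [pyLoopA]
    by_cases hpos : 0 < nl
    · simp only [hpos, if_true]
      by_cases hbig : c * 2 - 1 ≤ nl
      · -- full layer of 2c-1 nodes
        have hmin : min (c * 2 - 1) nl = c * 2 - 1 := min_eq_left hbig
        rw [hmin]
        have hcq' : c ≤ q := by nlinarith
        have := ih (nl - (c*2-1)) (c+1) q (acc ++ [c*2-1]) (by omega) (by omega) (by omega)
          (by omega) (by nlinarith [hlb]) (by nlinarith [hub])
        rw [this, PySem.List.pyRange_one_cons (show c < q + 1 by omega)]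
        have e1 : nl - (c*2-1) + (c+1-1)*(c+1-1) = nl + (c-1)*(c-1) := by ring
        have e2 : c*2-1 = 2*c-1 := by ring
        rw [e1, e2]
        simp [List.append_assoc]
      · -- partial last layer of nl nodes
        have hmin : min (c * 2 - 1) nl = nl := min_eq_right (by omega)
        rw [hmin]
        have hq : q = c - 1 := by nlinarith
        subst hq
        have e0 : nl - nl = (0:Int) := by ring
        rw [e0]
        rw [ih 0 (c+1) c (acc ++ [nl]) (by omega) (by omega) (by omega)
          (by omega) (by nlinarith) (by nlinarith)]
        rw [PySem.List.pyRange_one_eq_nil (show (c:Int) - 1 + 1 ≤ c by omega),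
            PySem.List.pyRange_one_eq_nil (show (c:Int) + 1 ≤ c + 1 by omega)]
        have h1 : (0:Int) + (c+1-1)*(c+1-1) - c*c = 0 := by ring
        have h2 : nl + (c-1)*(c-1) - (c-1)*(c-1) = nl := by ring
        rw [h1, h2]
        simp [hpos]
    · simp only [hpos, if_false]
      have h0 : nl = 0 := by omega
      subst h0
      have hq : q = c - 1 := by nlinarith
      subst hq
      rw [PySem.List.pyRange_one_eq_nil (show (c:Int) - 1 + 1 ≤ c by omega)]
      have h2 : (0:Int) + (c-1)*(c-1) - (c-1)*(c-1) = 0 := by ring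
      rw [h2]
      simp

-- ===== VERDICT (by name: the statement is the Claim_ definition above) =====
theorem calculate_pyramid_layers_py_spec : Claim_equal_calculate_pyramid_layers_py := by
  intro num_nodes _
  unfold Spec_calculate_pyramid_layers_py calculate_pyramid_layers_py calculate_pyramid_layers_py_alt
  set nl := num_nodes - 1 with hnl
  by_cases hle : nl ≤ 0
  · have h0 : nl.toNat = 0 := by omega
    rw [h0]
    simp [pyLoopA, hle]
  · have hn1 : 1 ≤ nl := by omega
    obtain ⟨hm1, hmlb, hmub⟩ := pyIsqrt_spec nl hn1
    rw [pyLoopA_eq nl.toNat nl 1 (pyIsqrt nl) [] (le_refl 1) (by omega) (le_refl _)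
        (by omega) (by simpa using hmlb) (by simpa using hmub)]
    simp only [hle, if_false, List.nil_append]
    have : nl + (1-1)*(1-1) - pyIsqrt nl * pyIsqrt nl = nl - pyIsqrt nl * pyIsqrt nl := by ring
    rw [this]
    split_ifs
    · rfl
    · simp
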